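-- pv_equiv track=rewrite | github.com/Azure/azure-cli | src/command_modules/azure-cli-appservice/azure/cli/command_modules/appservice/custom.py | _match_host_names_from_cert
-- ===== SOURCE A (Python) =====
-- def _match_host_names_from_cert(hostnames_from_cert, hostnames_in_webapp):
--     # the goal is to match '*.foo.com' with host name like 'admin.foo.com', 'logs.foo.com', etc
--     matched = set()
--     for hostname in hostnames_from_cert:
--         if hostname.startswith('*'):
--             for h in hostnames_in_webapp:
--                 if hostname[hostname.find('.'):] == h[h.find('.'):]:
--                     matched.add(h)
--         elif hostname in hostnames_in_webapp:
--             matched.add(hostname)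
--     return matched
-- ===== SOURCE B (Python) =====
-- def _match_host_names_from_cert(hostnames_from_cert, hostnames_in_webapp):
--     # index webapp hostnames by their '.'-suffix once, then one lookup per cert name
--     def suffix(s):
--         return s[s.find('.'):]
--     by_suffix = {}
--     for h in hostnames_in_webapp:
--         by_suffix[suffix(h)] = by_suffix.get(suffix(h), []) + [h]
--     webapp_set = set(hostnames_in_webapp)
--     matched = set()
--     for hostname in hostnames_from_cert:
--         if hostname.startswith('*'):
--             matched.update(by_suffix.get(suffix(hostname), []))
--         elif hostname in webapp_set:
--             matched.add(hostname)
--     return matched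
-- ===== Notes on version B (the rewrite author's own statement) =====
-- stated objective: faster
-- what changed: Replaced the per-wildcard linear scan of webapp hostnames with a dict that groups webapp hostnames by their '.'-suffix built in one pass, plus a set for exact-name membership, so each cert hostname costs one lookup.
import Mathlib
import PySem

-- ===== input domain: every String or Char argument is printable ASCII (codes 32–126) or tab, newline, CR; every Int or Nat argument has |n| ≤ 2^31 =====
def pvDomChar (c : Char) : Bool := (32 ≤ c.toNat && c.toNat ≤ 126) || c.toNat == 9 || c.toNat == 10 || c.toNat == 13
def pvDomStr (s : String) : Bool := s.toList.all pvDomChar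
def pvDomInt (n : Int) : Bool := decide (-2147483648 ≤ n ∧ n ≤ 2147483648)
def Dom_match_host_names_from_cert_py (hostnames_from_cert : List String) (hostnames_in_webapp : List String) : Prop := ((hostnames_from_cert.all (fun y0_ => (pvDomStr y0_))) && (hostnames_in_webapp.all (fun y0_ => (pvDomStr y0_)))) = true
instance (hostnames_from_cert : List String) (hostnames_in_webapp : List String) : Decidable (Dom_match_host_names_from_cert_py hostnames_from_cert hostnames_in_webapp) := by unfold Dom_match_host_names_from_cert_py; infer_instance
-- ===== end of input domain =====

-- B replaces A's nested scan (each wildcard cert name against every webapp hostname) by a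
-- suffix-indexed dict built once plus a set for exact membership; objective: faster (asymptotic).

-- ===== PORT A =====
-- literal transliteration of A: outer loop over cert names, inner scan of webapp names per wildcard
def match_host_names_from_cert_py (hostnames_from_cert : List String) (hostnames_in_webapp : List String) : List String :=
  hostnames_from_cert.foldl (fun matched hostname =>
    if PySem.Str.startswith hostname "*" then
      hostnames_in_webapp.foldl (fun matched h =>
        if PySem.Str.slice hostname (some (PySem.Str.find hostname ".")) none
            == PySem.Str.slice h (some (PySem.Str.find h ".")) none then
          PySem.Set.add matched h
        else matched) matched
    else if hostnames_in_webapp.contains hostname then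
      PySem.Set.add matched hostname
    else matched) PySem.Set.empty

-- ===== PORT B =====
-- B-side helper: suffix(s) = s[s.find('.'):]
def pvSuffix (s : String) : String :=
  PySem.Str.slice s (some (PySem.Str.find s ".")) none

def match_host_names_from_cert_py_alt (hostnames_from_cert : List String) (hostnames_in_webapp : List String) : List String :=
  let bySuffix : PySem.Dict String (List String) :=
    hostnames_in_webapp.foldl
      (fun d h => d.modify (pvSuffix h) [] (fun v => v ++ [h])) PySem.Dict.empty
  let webappSet : PySem.Set String := PySem.Set.ofList hostnames_in_webapp
  hostnames_from_cert.foldl (fun matched hostname =>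
    if PySem.Str.startswith hostname "*" then
      PySem.Set.update matched (bySuffix.getD (pvSuffix hostname) [])
    else if PySem.Set.contains webappSet hostname then
      PySem.Set.add matched hostname
    else matched) PySem.Set.empty

-- ===== PRECONDITION & SPEC =====
def Spec_match_host_names_from_cert_py (hostnames_from_cert : List String) (hostnames_in_webapp : List String) (out : List String) : Prop := out = match_host_names_from_cert_py_alt hostnames_from_cert hostnames_in_webapp
instance (hostnames_from_cert : List String) (hostnames_in_webapp : List String) (out : List String) : Decidable (Spec_match_host_names_from_cert_py hostnames_from_cert hostnames_in_webapp out) := by unfold Spec_match_host_names_from_cert_py; infer_instance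

-- ===== CLAIM (what is proved, stated in full; the proofs are below) =====
def Claim_equal_match_host_names_from_cert_py : Prop := ∀ (hostnames_from_cert : List String) (hostnames_in_webapp : List String), Dom_match_host_names_from_cert_py hostnames_from_cert hostnames_in_webapp → Spec_match_host_names_from_cert_py hostnames_from_cert hostnames_in_webapp (match_host_names_from_cert_py hostnames_from_cert hostnames_in_webapp)

-- ===== LEMMAS AND PROOFS =====

-- the grouping dict's entry at `suf` is exactly the webapp hostnames with that suffix, in order
theorem pv_group (suf : String) (l : List String) (d : PySem.Dict String (List String)) :
    (l.foldl (fun d h => d.modify (pvSuffix h) [] (fun v => v ++ [h])) d).getD suf []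
      = d.getD suf [] ++ l.filter (fun h => pvSuffix h == suf) := by
  induction l generalizing d with
  | nil => simp
  | cons h t ih =>
    simp only [List.foldl_cons, List.filter_cons, ih, PySem.Dict.getD_modify]
    by_cases hc : suf = pvSuffix h
    · simp [hc]
    · have hc2 : ¬ pvSuffix h = suf := fun hh => hc hh.symm
      simp [hc, hc2]

-- A's inner wildcard scan is Set.update with the suffix-filtered webapp list
theorem pv_inner (c : String) (l : List String) (m : PySem.Set String) :
    l.foldl (fun m h =>
        if PySem.Str.slice c (some (PySem.Str.find c ".")) none
            == PySem.Str.slice h (some (PySem.Str.find h ".")) none then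
          PySem.Set.add m h else m) m
      = PySem.Set.update m (l.filter (fun h => pvSuffix h == pvSuffix c)) := by
  induction l generalizing m with
  | nil => simp [PySem.Set.update]
  | cons h t ih =>
    have hbeq : (PySem.Str.slice c (some (PySem.Str.find c ".")) none
        == PySem.Str.slice h (some (PySem.Str.find h ".")) none)
        = (pvSuffix h == pvSuffix c) := by
      unfold pvSuffix; exact Bool.beq_comm
    simp only [List.foldl_cons, List.filter_cons]
    rw [hbeq]
    by_cases hc : pvSuffix h = pvSuffix c
    · rw [if_pos (by simp [hc]), if_pos (by simp [hc]), ih]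
      rfl
    · rw [if_neg (by simp [hc]), if_neg (by simp [hc])]
      exact ih m

theorem pv_main (cert webapp : List String) :
    match_host_names_from_cert_py cert webapp = match_host_names_from_cert_py_alt cert webapp := by
  unfold match_host_names_from_cert_py match_host_names_from_cert_py_alt
  simp only []
  congr 1
  funext m hostname
  by_cases hw : PySem.Str.startswith hostname "*" = true
  · simp only [hw, if_true]
    rw [pv_inner, pv_group]
    simp
  · simp only [Bool.not_eq_true] at hw
    simp only [hw, Bool.false_eq_true, if_false]
    have hmem : PySem.Set.contains (PySem.Set.ofList webapp) hostname = webapp.contains hostname := by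
      by_cases h : hostname ∈ webapp <;>
        simp [PySem.Set.contains, PySem.Set.mem_ofList, h]
    rw [hmem]

-- ===== VERDICT (by name: the statement is the Claim_ definition above) =====
theorem match_host_names_from_cert_py_spec : Claim_equal_match_host_names_from_cert_py := by
  intro cert webapp _
  unfold Spec_match_host_names_from_cert_py
  exact pv_main cert webapp
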